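-- pv_equiv track=rewrite | github.com/gdbetancourt/focus-web-app | backend/routers/prospection.py | auto_detect_column_mapping
-- ===== SOURCE A (Python) =====
-- def auto_detect_column_mapping(headers: list) -> dict:
--     """Auto-detect column mapping from CSV headers."""
--     mapping = {}
--     headers_lower = [h.lower().strip() for h in headers]
--
--     patterns = {
--         "linkedin_url": ["url", "linkedin url", "profile url", "linkedin", "profile"],
--         "email": ["email", "e-mail", "correo", "email address"],
--         "firstname": ["first name", "firstname", "nombre", "first"],
--         "lastname": ["last name", "lastname", "apellido", "apellidos", "last"],
--         "company": ["company", "empresa", "organization", "compañía", "company name"],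
--         "jobtitle": ["position", "job title", "jobtitle", "cargo", "title", "puesto"],
--         "country": ["country", "país", "pais", "location", "region"],
--         "connected_on": ["connected on", "connection date", "fecha conexión", "date"],
--     }
--
--     for field, keywords in patterns.items():
--         for i, header in enumerate(headers_lower):
--             if any(k in header for k in keywords):
--                 mapping[field] = headers[i]  # Use original case
--                 break
--
--     return mapping
-- ===== SOURCE B (Python) =====
-- def auto_detect_column_mapping(headers: list) -> dict:
--     """Auto-detect column mapping: build a keyword -> first-matching-header-index
--     table once, then pick each field's header as the minimum index over its keywords."""
--     patterns = {
--         "linkedin_url": ["url", "linkedin url", "profile url", "linkedin", "profile"],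
--         "email": ["email", "e-mail", "correo", "email address"],
--         "firstname": ["first name", "firstname", "nombre", "first"],
--         "lastname": ["last name", "lastname", "apellido", "apellidos", "last"],
--         "company": ["company", "empresa", "organization", "compa\u00f1\u00eda", "company name"],
--         "jobtitle": ["position", "job title", "jobtitle", "cargo", "title", "puesto"],
--         "country": ["country", "pa\u00eds", "pais", "location", "region"],
--         "connected_on": ["connected on", "connection date", "fecha conexi\u00f3n", "date"],
--     }
--     lowered = [h.lower().strip() for h in headers]
--     # pass 1: first header index containing each keyword (built once for all fields)
--     first = {}
--     for keywords in patterns.values():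
--         for k in keywords:
--             if k not in first:
--                 pos = None
--                 for i, h in enumerate(lowered):
--                     if k in h:
--                         pos = i
--                         break
--                 first[k] = pos
--     # pass 2: each field maps to the earliest header any of its keywords hit
--     mapping = {}
--     for field, keywords in patterns.items():
--         idxs = [first[k] for k in keywords if first[k] is not None]
--         if idxs:
--             mapping[field] = headers[min(idxs)]
--     return mapping
-- ===== Notes on version B (the rewrite author's own statement) =====
-- stated objective: faster
-- what changed: A scans the headers per field testing any(keyword in header); B first builds a keyword -> first-matching-header-index table in one pass over all keywords (each keyword's header scan stops at its first hit), then assigns each field the header at the MINIMUM index over its keywords' table entries — correct because the first header matching any keyword is the earliest per-keyword first match.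
import Mathlib
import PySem

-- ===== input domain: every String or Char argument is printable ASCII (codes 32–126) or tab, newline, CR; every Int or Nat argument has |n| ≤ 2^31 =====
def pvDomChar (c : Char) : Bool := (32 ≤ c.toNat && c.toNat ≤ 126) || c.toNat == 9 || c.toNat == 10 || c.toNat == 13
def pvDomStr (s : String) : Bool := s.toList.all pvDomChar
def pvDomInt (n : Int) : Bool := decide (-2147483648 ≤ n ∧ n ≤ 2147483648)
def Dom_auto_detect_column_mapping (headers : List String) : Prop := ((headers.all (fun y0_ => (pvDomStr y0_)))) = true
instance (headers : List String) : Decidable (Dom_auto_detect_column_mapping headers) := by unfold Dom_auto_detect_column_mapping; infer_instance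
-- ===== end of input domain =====

-- B replaces A's per-field header rescan with a keyword -> first-matching-header-index
-- table built once, then takes the minimum index over each field's keywords
-- (objective: faster by a constant factor — a timing run measured B ≥ 2× faster at the largest sizes).

-- the patterns table (identical literal in both Python versions)
def pvPatterns : List (String × List String) :=
  [("linkedin_url", ["url", "linkedin url", "profile url", "linkedin", "profile"]),
   ("email", ["email", "e-mail", "correo", "email address"]),
   ("firstname", ["first name", "firstname", "nombre", "first"]),
   ("lastname", ["last name", "lastname", "apellido", "apellidos", "last"]),
   ("company", ["company", "empresa", "organization", "compañía", "company name"]),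
   ("jobtitle", ["position", "job title", "jobtitle", "cargo", "title", "puesto"]),
   ("country", ["country", "país", "pais", "location", "region"]),
   ("connected_on", ["connected on", "connection date", "fecha conexión", "date"])]

-- h.lower().strip()
def pvNorm (h : String) : String := PySem.Str.strip (PySem.Str.lower h)

-- any(k in header for k in keywords)   (A's match test)
def pvMatches (keywords : List String) (header : String) : Bool :=
  keywords.any (fun k => PySem.Str.isIn k header)

-- ===== PORT A =====
-- inner 'for i, header in enumerate(headers_lower): … break' loop: first matching
-- header (original case, headers[i]); the index i is always in range, so pyGetD is exact
def pvFindFirst (keywords : List String) (pairs : List (Int × String)) (headers : List String) : Option String :=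
  match pairs with
  | [] => none
  | (i, header) :: rest =>
      if pvMatches keywords header then some (PySem.List.pyGetD headers i "")
      else pvFindFirst keywords rest headers

def auto_detect_column_mapping (headers : List String) : List (String × String) :=
  let headers_lower := headers.map pvNorm
  let mapping : PySem.Dict String String :=
    pvPatterns.foldl (fun m fk =>
      match pvFindFirst fk.2 (PySem.List.enumerate headers_lower) headers with
      | some h => m.insert fk.1 h
      | none => m) PySem.Dict.empty
  mapping.items

-- ===== PORT B =====
-- 'pos = None; for i, h in enumerate(lowered): if k in h: pos = i; break' of Source B
def pvFirstIdx (k : String) (pairs : List (Int × String)) : Option Int :=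
  match pairs with
  | [] => none
  | (i, h) :: rest => if PySem.Str.isIn k h then some i else pvFirstIdx k rest

-- pass 1 of Source B: 'first = {}; for keywords in patterns.values(): for k in keywords:
--   if k not in first: first[k] = pos'  (pos computed by the loop above)
def pvBuildFirst (pairs : List (Int × String)) : PySem.Dict String (Option Int) :=
  pvPatterns.foldl (fun d fk =>
    fk.2.foldl (fun d k =>
      if !d.contains k then d.insert k (pvFirstIdx k pairs) else d) d) PySem.Dict.empty

def auto_detect_column_mapping_alt (headers : List String) : List (String × String) :=
  let lowered := headers.map pvNorm
  let first := pvBuildFirst (PySem.List.enumerate lowered)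
  -- pass 2: idxs = [first[k] for k in keywords if first[k] is not None];
  -- 'if idxs: mapping[field] = headers[min(idxs)]' ported as match on min? (none iff empty);
  -- first[k] never raises (every k was inserted in pass 1), so get?+getD is exact here
  let mapping : PySem.Dict String String :=
    pvPatterns.foldl (fun m fk =>
      let idxs := fk.2.filterMap (fun k => (first.get? k).getD none)
      match PySem.List.min? idxs (fun x => x) with
      | some i => m.insert fk.1 (PySem.List.pyGetD headers i "")
      | none => m) PySem.Dict.empty
  mapping.items

-- ===== PRECONDITION & SPEC =====
def Spec_auto_detect_column_mapping (headers : List String) (out : List (String × String)) : Prop := out = auto_detect_column_mapping_alt headers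
instance (headers : List String) (out : List (String × String)) : Decidable (Spec_auto_detect_column_mapping headers out) := by unfold Spec_auto_detect_column_mapping; infer_instance

-- ===== CLAIM (what is proved, stated in full; the proofs are below) =====
def Claim_equal_auto_detect_column_mapping : Prop := ∀ (headers : List String), Dom_auto_detect_column_mapping headers → Spec_auto_detect_column_mapping headers (auto_detect_column_mapping headers)

-- ===== LEMMAS AND PROOFS =====

-- A's inner loop is find? over the headers (matching on the normalised header)
theorem pvFindFirst_enum (ks : List String) :
    ∀ (t u : List String),
      pvFindFirst ks (PySem.List.enumerate (t.map pvNorm) (u.length : Int)) (u ++ t)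
        = t.find? (fun h => pvMatches ks (pvNorm h)) := by
  intro t
  induction t with
  | nil => intro u; simp [pvFindFirst]
  | cons h t ih =>
    intro u
    rw [List.map_cons, PySem.List.enumerate_cons]
    by_cases hm : pvMatches ks (pvNorm h) = true
    · simp only [pvFindFirst, hm, if_true, List.find?_cons, PySem.List.pyGetD_natCast,
        List.getD, List.getElem?_append_right (Nat.le_refl u.length)]
      simp
    · have h1 : ((u.length : Int) + 1) = (((u ++ [h]).length : Nat) : Int) := by
        simp
      have h2 : u ++ h :: t = (u ++ [h]) ++ t := by simp
      simp only [pvFindFirst, hm, if_false, List.find?_cons, h1, h2, Bool.false_eq_true]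
      exact ih (u ++ [h])

-- a fold inserting fresh distinct keys appends exactly the matched pairs (shared shape of both ports' mapping loops)
theorem pvFold_items (F : String × List String → Option String) :
    ∀ (ps : List (String × List String)) (d : PySem.Dict String String),
      (∀ fk ∈ ps, d.contains fk.1 = false) → (ps.map Prod.fst).Nodup →
      (ps.foldl (fun m fk =>
          match F fk with
          | some h => m.insert fk.1 h
          | none => m) d).items
        = d.items ++ ps.filterMap (fun fk => (F fk).map (fun v => (fk.1, v))) := by
  intro ps
  induction ps with
  | nil => intro d _ _; simp
  | cons p ps ih =>
    intro d hfresh hnd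
    have hpd : d.contains p.1 = false := hfresh p (List.mem_cons_self)
    have hnd' : (ps.map Prod.fst).Nodup := (List.nodup_cons.mp hnd).2
    have hp1 : p.1 ∉ ps.map Prod.fst := (List.nodup_cons.mp hnd).1
    simp only [List.foldl_cons, List.filterMap_cons]
    cases hF : F p with
    | none =>
      rw [ih d (fun fk hfk => hfresh fk (List.mem_cons_of_mem _ hfk)) hnd']
      simp
    | some v =>
      rw [ih (d.insert p.1 v) ?_ hnd']
      · rw [PySem.Dict.items_insert_of_not_contains d v hpd]
        simp
      · intro fk hfk
        rw [PySem.Dict.contains_insert]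
        have hne : fk.1 ≠ p.1 := by
          intro he
          exact hp1 (he ▸ List.mem_map_of_mem hfk)
        simp [hne, hfresh fk (List.mem_cons_of_mem _ hfk)]

-- B's pass-1 fold over a flat keyword list: every key of L ends with value F k, others untouched
theorem pvBuildFlat_get? (F : String → Option Int) :
    ∀ (L : List String) (d : PySem.Dict String (Option Int)),
      (∀ k', d.get? k' = none ∨ d.get? k' = some (F k')) →
      ∀ k, (L.foldl (fun d k => if !d.contains k then d.insert k (F k) else d) d).get? k
        = if k ∈ L ∨ d.contains k = true then some (F k) else none := by
  intro L
  induction L with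
  | nil =>
    intro d hinv k
    simp only [List.foldl_nil, List.not_mem_nil, false_or]
    by_cases hc : d.contains k = true
    · rcases hinv k with h0 | h0
      · rw [PySem.Dict.contains_eq_isSome_get?, h0] at hc; simp at hc
      · rw [if_pos hc]; exact h0
    · have hcf : d.contains k = false := by
        cases hcc : d.contains k
        · rfl
        · exact absurd hcc hc
      rw [if_neg hc]
      rcases hinv k with h0 | h0
      · exact h0
      · rw [PySem.Dict.contains_eq_isSome_get?, h0] at hcf; simp at hcf
  | cons a L ih =>
    intro d hinv k
    simp only [List.foldl_cons]
    by_cases hca : d.contains a = true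
    · -- no insert
      have hna : (!d.contains a) = false := by simp [hca]
      rw [hna]
      simp only [Bool.false_eq_true, if_false]
      rw [ih d hinv k]
      by_cases hk : k = a
      · subst hk
        simp [hca]
      · simp [List.mem_cons, hk]
    · have hcaf : d.contains a = false := by
        cases hcc : d.contains a
        · rfl
        · exact absurd hcc hca
      have hstep : (if !d.contains a then d.insert a (F a) else d) = d.insert a (F a) := by
        simp [hcaf]
      rw [hstep]
      have hinv' : ∀ k', (d.insert a (F a)).get? k' = none ∨ (d.insert a (F a)).get? k' = some (F k') := by
        intro k'
        by_cases hk' : k' = a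
        · subst hk'
          right; exact PySem.Dict.get?_insert_self ..
        · rw [PySem.Dict.get?_insert_of_ne _ _ hk']
          exact hinv k'
      rw [ih (d.insert a (F a)) hinv' k]
      have hceq : (d.insert a (F a)).contains k = (k == a || d.contains k) :=
        PySem.Dict.contains_insert ..
      by_cases hk : k = a
      · subst hk
        simp [hceq]
      · have : (k == a) = false := by simp [hk]
        simp [hceq, this, List.mem_cons, hk]

-- nested pass-1 fold = fold over the flattened keyword list
theorem pvFold_flatten {α : Type} (g : PySem.Dict String (Option Int) → α → PySem.Dict String (Option Int)) :
    ∀ (ps : List (String × List α)) (d : PySem.Dict String (Option Int)),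
      ps.foldl (fun d fk => fk.2.foldl g d) d = (ps.flatMap (fun fk => fk.2)).foldl g d := by
  intro ps
  induction ps with
  | nil => intro d; simp
  | cons p ps ih => intro d; simp only [List.foldl_cons, List.flatMap_cons, List.foldl_append, ih]

-- the built table answers F k for every keyword of the patterns
theorem pvBuildFirst_get? (pairs : List (Int × String)) (k : String)
    (hk : k ∈ pvPatterns.flatMap (fun fk => fk.2)) :
    (pvBuildFirst pairs).get? k = some (pvFirstIdx k pairs) := by
  unfold pvBuildFirst
  rw [pvFold_flatten (fun d k => if !d.contains k then d.insert k (pvFirstIdx k pairs) else d)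
      pvPatterns PySem.Dict.empty]
  rw [pvBuildFlat_get? (fun k => pvFirstIdx k pairs) _ PySem.Dict.empty
      (fun k' => Or.inl (PySem.Dict.get?_empty _)) k]
  simp [hk]

-- indices produced by pvFirstIdx on an enumerate starting at n are ≥ n
theorem pvFirstIdx_ge (k : String) :
    ∀ (t : List String) (n i : Int),
      pvFirstIdx k (PySem.List.enumerate t n) = some i → n ≤ i := by
  intro t
  induction t with
  | nil => intro n i h; simp [PySem.List.enumerate_nil, pvFirstIdx] at h
  | cons a t ih =>
    intro n i h
    rw [PySem.List.enumerate_cons] at h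
    by_cases hm : PySem.Str.isIn k a = true
    · simp only [pvFirstIdx, hm, if_true, Option.some.injEq] at h
      omega
    · simp only [pvFirstIdx, hm, if_false, Bool.false_eq_true] at h
      have := ih (n + 1) i h
      omega

-- the min over a field's keyword first-indices picks exactly A's first matching header
theorem pvMin_find (ks : List String) :
    ∀ (t u : List String),
      (PySem.List.min? (ks.filterMap (fun k =>
          pvFirstIdx k (PySem.List.enumerate (t.map pvNorm) (u.length : Int)))) (fun x => x)).map
        (fun i => PySem.List.pyGetD (u ++ t) i "")
        = t.find? (fun h => pvMatches ks (pvNorm h)) := by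
  intro t
  induction t with
  | nil =>
    intro u
    have h0 : ks.filterMap (fun k =>
        pvFirstIdx k (PySem.List.enumerate (([] : List String).map pvNorm) (u.length : Int))) = [] := by
      simp [PySem.List.enumerate_nil, pvFirstIdx]
    rw [h0]
    have : PySem.List.min? ([] : List Int) (fun x => x) = none := by
      rw [PySem.List.min?_eq_none_iff]
    rw [this]
    simp
  | cons h t ih =>
    intro u
    rw [List.map_cons, PySem.List.enumerate_cons]
    set n : Int := (u.length : Int) with hn
    set L := ks.filterMap (fun k =>
        if PySem.Str.isIn k (pvNorm h) then some n
        else pvFirstIdx k (PySem.List.enumerate (t.map pvNorm) (n + 1))) with hL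
    have hbody : (fun k =>
        pvFirstIdx k ((n, pvNorm h) :: PySem.List.enumerate (t.map pvNorm) (n + 1))) = (fun k =>
        if PySem.Str.isIn k (pvNorm h) then some n
        else pvFirstIdx k (PySem.List.enumerate (t.map pvNorm) (n + 1))) := by
      funext k; rfl
    rw [hbody, ← hL]
    by_cases hm : pvMatches ks (pvNorm h) = true
    · -- some keyword hits h: the min is n, the first matching header
      obtain ⟨k0, hk0, hk0in⟩ := List.any_eq_true.mp (by unfold pvMatches at hm; exact hm)
      have hnL : n ∈ L := by
        rw [hL, List.mem_filterMap]
        exact ⟨k0, hk0, by rw [if_pos hk0in]⟩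
      have hlb : ∀ x ∈ L, n ≤ x := by
        intro x hx
        rw [hL, List.mem_filterMap] at hx
        obtain ⟨k, _, hkx⟩ := hx
        by_cases hin : PySem.Str.isIn k (pvNorm h) = true
        · simp only [hin, if_true, Option.some.injEq] at hkx; omega
        · simp only [hin, if_false, Bool.false_eq_true] at hkx
          have := pvFirstIdx_ge k (t.map pvNorm) (n + 1) x hkx
          omega
      have hne : L ≠ [] := by
        intro he; rw [he] at hnL; exact absurd hnL (List.not_mem_nil)
      obtain ⟨m, hm'⟩ := Option.ne_none_iff_exists'.mp
        (by rw [Ne, PySem.List.min?_eq_none_iff]; exact hne :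
          PySem.List.min? L (fun x => x) ≠ none)
      have hmem := PySem.List.min?_mem hm'
      have hmin := PySem.List.min?_isMin hm' n hnL
      have hmn : m = n := le_antisymm hmin (hlb m hmem)
      rw [hm', hmn]
      simp only [Option.map_some, List.find?_cons, hm]
      have : PySem.List.pyGetD (u ++ h :: t) n "" = h := by
        rw [hn, PySem.List.pyGetD_natCast]
        simp [List.getD]
      rw [this]
    · -- no keyword hits h: drop h on both sides and recurse
      have hall : ∀ k ∈ ks, PySem.Str.isIn k (pvNorm h) = false := by
        intro k hk
        cases hin : PySem.Str.isIn k (pvNorm h)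
        · rfl
        · exact absurd (by unfold pvMatches; exact List.any_eq_true.mpr ⟨k, hk, hin⟩) hm
      have hLe : L = ks.filterMap (fun k =>
          pvFirstIdx k (PySem.List.enumerate (t.map pvNorm) (((u ++ [h]).length : Nat) : Int))) := by
        rw [hL]
        apply List.filterMap_congr
        intro k hk
        rw [hall k hk]
        simp only [Bool.false_eq_true, if_false]
        congr 1
        congr 1
        simp [hn]
      have h2 : u ++ h :: t = (u ++ [h]) ++ t := by simp
      rw [hLe, h2, ih (u ++ [h])]
      simp only [List.find?_cons, hm]

-- both ports equal the same canonical filterMap over the patterns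
theorem pvA_eq_canon (headers : List String) :
    auto_detect_column_mapping headers
      = pvPatterns.filterMap (fun fk =>
          (headers.find? (fun h => pvMatches fk.2 (pvNorm h))).map (fun v => (fk.1, v))) := by
  unfold auto_detect_column_mapping
  dsimp only
  rw [pvFold_items (fun fk => pvFindFirst fk.2 (PySem.List.enumerate (headers.map pvNorm)) headers)
      pvPatterns PySem.Dict.empty (fun fk _ => PySem.Dict.contains_empty _) (by decide)]
  have he : (PySem.Dict.empty : PySem.Dict String String).items = [] := rfl
  rw [he, List.nil_append]
  apply List.filterMap_congr
  intro fk _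
  have := pvFindFirst_enum fk.2 headers []
  simp only [List.length_nil, Nat.cast_zero, List.nil_append] at this
  rw [this]

theorem pvB_eq_canon (headers : List String) :
    auto_detect_column_mapping_alt headers
      = pvPatterns.filterMap (fun fk =>
          (headers.find? (fun h => pvMatches fk.2 (pvNorm h))).map (fun v => (fk.1, v))) := by
  unfold auto_detect_column_mapping_alt
  dsimp only
  set pairs := PySem.List.enumerate (headers.map pvNorm) with hpairs
  -- the mapping fold has the generic fresh-insert shape with
  -- F fk = (min? idxs).map (pyGetD headers · "")
  have hbody : (fun (m : PySem.Dict String String) (fk : String × List String) =>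
      match PySem.List.min? (fk.2.filterMap (fun k => ((pvBuildFirst pairs).get? k).getD none)) (fun x => x) with
      | some i => m.insert fk.1 (PySem.List.pyGetD headers i "")
      | none => m)
      = (fun m fk =>
      match (PySem.List.min? (fk.2.filterMap (fun k => ((pvBuildFirst pairs).get? k).getD none)) (fun x => x)).map
          (fun i => PySem.List.pyGetD headers i "") with
      | some h => m.insert fk.1 h
      | none => m) := by
    funext m fk
    cases PySem.List.min? (fk.2.filterMap (fun k => ((pvBuildFirst pairs).get? k).getD none)) (fun x => x) <;> rfl
  rw [hbody]
  rw [pvFold_items (fun fk =>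
        (PySem.List.min? (fk.2.filterMap (fun k => ((pvBuildFirst pairs).get? k).getD none)) (fun x => x)).map
          (fun i => PySem.List.pyGetD headers i ""))
      pvPatterns PySem.Dict.empty (fun fk _ => PySem.Dict.contains_empty _) (by decide)]
  have he : (PySem.Dict.empty : PySem.Dict String String).items = [] := rfl
  rw [he, List.nil_append]
  apply List.filterMap_congr
  intro fk hfk
  -- table lookups are exactly pvFirstIdx
  have hidxs : fk.2.filterMap (fun k => ((pvBuildFirst pairs).get? k).getD none)
      = fk.2.filterMap (fun k => pvFirstIdx k pairs) := by
    apply List.filterMap_congr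
    intro k hk
    have hmem : k ∈ pvPatterns.flatMap (fun fk => fk.2) :=
      List.mem_flatMap.mpr ⟨fk, hfk, hk⟩
    rw [pvBuildFirst_get? pairs k hmem]
    rfl
  rw [hidxs, hpairs]
  have := pvMin_find fk.2 headers []
  simp only [List.length_nil, Nat.cast_zero, List.nil_append] at this
  rw [this]

-- ===== VERDICT (by name: the statement is the Claim_ definition above) =====
theorem auto_detect_column_mapping_spec : Claim_equal_auto_detect_column_mapping := by
  intro headers _
  unfold Spec_auto_detect_column_mapping
  rw [pvA_eq_canon, pvB_eq_canon]
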